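-- pv_equiv track=rewrite | github.com/danielcosta2005/Algoritmos-1 | TP3/algorithms.py | preprocess_right_half
-- ===== SOURCE A (Python) =====
-- def preprocess_right_half(left_size, right_size, conflict_masks):
--     """
--     Processa todos os subconjuntos da metade direita (tamanho right_size),
--     determinando se são independentes e qual o seu tamanho.
--
--     Retorna:
--         sizeR[mask]       -- tamanho do subset se independente, ou -inf se não
--         base_maskR[mask]  -- o próprio mask se independente, ou 0 se não
--     """
--     R = right_size
--
--     if R == 0:
--         # Sem metade direita: só o conjunto vazio
--         return [0], [0]
--
--     num_masks = 1 << R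
--     independentR = [False] * num_masks
--     sizeR = [-10**9] * num_masks
--     base_maskR = [0] * num_masks
--
--     independentR[0] = True
--     sizeR[0] = 0
--     base_maskR[0] = 0
--
--     for mask in range(1, num_masks):
--         lsb = mask & -mask
--         v_local = lsb.bit_length() - 1
--         prev = mask ^ lsb
--
--         if not independentR[prev]:
--             independentR[mask] = False
--             sizeR[mask] = -10**9
--             continue
--
--         v_global = left_size + v_local
--         global_prev_mask = prev << left_size  # prev só vive na direita
--
--         # Se v_global briga com alguém de prev (na direita), não é independente
--         if conflict_masks[v_global] & global_prev_mask:
--             independentR[mask] = False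
--             sizeR[mask] = -10**9
--         else:
--             independentR[mask] = True
--             sizeR[mask] = sizeR[prev] + 1
--             base_maskR[mask] = mask
--
--     return sizeR, base_maskR
-- ===== SOURCE B (Python) =====
-- def _scan(mask, left_size, conflict_masks):
--     """Scan mask's set bits low-to-high; return (independent, number_of_bits).
--
--     A set is independent iff for every set bit v, the vertex left_size+v does
--     not conflict with the remaining higher bits (shifted into global positions).
--     """
--     if mask == 0:
--         return True, 0
--     lsb = mask & -mask
--     v_local = lsb.bit_length() - 1
--     rest = mask ^ lsb
--     if conflict_masks[left_size + v_local] & (rest << left_size):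
--         return False, 0
--     ok, k = _scan(rest, left_size, conflict_masks)
--     return ok, k + 1
--
--
-- def preprocess_right_half(left_size, right_size, conflict_masks):
--     if right_size == 0:
--         return [0], [0]
--     res = [_scan(mask, left_size, conflict_masks) for mask in range(1 << right_size)]
--     sizeR = [k if ok else -10**9 for (ok, k) in res]
--     base_maskR = [mask if ok else 0 for mask, (ok, _) in enumerate(res)]
--     return sizeR, base_maskR
-- ===== Notes on version B (the rewrite author's own statement) =====
-- stated objective: simpler
-- what changed: Drops A's DP tables (independentR/sizeR threaded from prev masks) and instead decides each mask independently by a recursive scan that pops the lowest set bit and checks it against the remaining higher bits, counting the popped bits for the size.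
import Mathlib
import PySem

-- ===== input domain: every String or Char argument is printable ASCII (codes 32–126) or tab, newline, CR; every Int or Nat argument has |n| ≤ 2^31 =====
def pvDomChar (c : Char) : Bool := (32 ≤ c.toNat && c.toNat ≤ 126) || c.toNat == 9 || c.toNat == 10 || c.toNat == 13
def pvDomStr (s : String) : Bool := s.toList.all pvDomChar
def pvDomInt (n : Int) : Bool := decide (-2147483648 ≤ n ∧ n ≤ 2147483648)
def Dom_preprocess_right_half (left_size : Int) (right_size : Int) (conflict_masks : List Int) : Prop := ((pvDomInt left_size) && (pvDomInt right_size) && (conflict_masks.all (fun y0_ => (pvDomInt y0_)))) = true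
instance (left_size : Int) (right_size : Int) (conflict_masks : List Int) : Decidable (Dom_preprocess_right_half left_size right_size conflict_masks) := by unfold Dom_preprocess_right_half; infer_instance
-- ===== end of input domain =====

-- B replaces A's DP over shared `independentR`/`sizeR` tables by an independent recursive
-- scan of each mask's set bits (no table state is threaded through the loop).

-- ===== PORT A =====
-- the body of A's `for mask in range(1, num_masks)` loop, as a named step function over the
-- state (independentR, (sizeR, base_maskR))
def pvStepA (left_size : Int) (conflict_masks : List Int)
    (s : List Bool × List Int × List Int) (mask : Int) : List Bool × List Int × List Int :=
  let independentR := s.1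
  let sizeR := s.2.1
  let base_maskR := s.2.2
  let lsb := PySem.Int.band mask (-mask)
  let v_local : Int := (PySem.Int.bitLength lsb : Int) - 1
  let prev := PySem.Int.bxor mask lsb
  if ¬ (PySem.List.pyGetD independentR prev false) then
    (PySem.List.pySetD independentR mask false,
      (PySem.List.pySetD sizeR mask (-10^9), base_maskR))
  else
    let v_global := left_size + v_local
    let global_prev_mask := prev <<< left_size.toNat   -- prev << left_size (0 ≤ left_size under Pre_)
    if PySem.Int.band (PySem.List.pyGetD conflict_masks v_global 0) global_prev_mask ≠ 0 then
      (PySem.List.pySetD independentR mask false,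
        (PySem.List.pySetD sizeR mask (-10^9), base_maskR))
    else
      (PySem.List.pySetD independentR mask true,
        (PySem.List.pySetD sizeR mask (PySem.List.pyGetD sizeR prev 0 + 1),
         PySem.List.pySetD base_maskR mask mask))

def preprocess_right_half (left_size : Int) (right_size : Int) (conflict_masks : List Int) : List Int × List Int :=
  if right_size = 0 then ([0], [0])
  else
    let num_masks : Int := 1 <<< right_size.toNat      -- 1 << right_size (0 ≤ right_size under Pre_)
    let independentR := PySem.List.pySetD (List.replicate num_masks.toNat false) 0 true
    let sizeR := PySem.List.pySetD (List.replicate num_masks.toNat (-10^9 : Int)) 0 0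
    let base_maskR := List.replicate num_masks.toNat (0 : Int)
    let st := (PySem.List.pyRange 1 num_masks 1).foldl (pvStepA left_size conflict_masks)
      (independentR, (sizeR, base_maskR))
    (st.2.1, st.2.2)

-- ===== PORT B =====
-- Bit facts used for pvScan's termination (clearing the lowest set bit decreases the mask).
theorem pv_tb_even_zero (a : Nat) : (2*a).testBit 0 = false := by
  simp [Nat.testBit_zero]
theorem pv_tb_odd_zero (a : Nat) : (2*a+1).testBit 0 = true := by
  simp [Nat.testBit_zero]
theorem pv_tb_even_succ (a i : Nat) : (2*a).testBit (i+1) = a.testBit i := by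
  have h2 : 2*a/2 = a := by omega
  rw [Nat.testBit_add_one, h2]
theorem pv_tb_odd_succ (a i : Nat) : (2*a+1).testBit (i+1) = a.testBit i := by
  have h2 : (2*a+1)/2 = a := by omega
  rw [Nat.testBit_add_one, h2]
theorem pv_and_even_odd (a b : Nat) : (2*a) &&& (2*b+1) = 2*(a &&& b) := by
  apply Nat.eq_of_testBit_eq
  intro i
  cases i with
  | zero => simp [Nat.testBit_and, pv_tb_even_zero, pv_tb_odd_zero]
  | succ j => simp [Nat.testBit_and, pv_tb_even_succ, pv_tb_odd_succ]
theorem pv_xor_even_even (a b : Nat) : (2*a) ^^^ (2*b) = 2*(a ^^^ b) := by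
  apply Nat.eq_of_testBit_eq
  intro i
  cases i with
  | zero => simp [Nat.testBit_xor, pv_tb_even_zero]
  | succ j => simp [Nat.testBit_xor, pv_tb_even_succ]
theorem pv_odd_and_even (k : Nat) : (2*k+1) &&& (2*k) = 2*k := by
  apply Nat.eq_of_testBit_eq
  intro i
  cases i with
  | zero => simp [Nat.testBit_and, pv_tb_even_zero, pv_tb_odd_zero]
  | succ j => simp [Nat.testBit_and, pv_tb_even_succ, pv_tb_odd_succ]
theorem pv_odd_xor_one (k : Nat) : (2*k+1) ^^^ 1 = 2*k := by
  have t0 : Nat.testBit 1 0 = true := by decide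
  have ts : ∀ j, Nat.testBit 1 (j+1) = false := by
    intro j
    have := pv_tb_odd_succ 0 j
    simpa using this
  apply Nat.eq_of_testBit_eq
  intro i
  cases i with
  | zero => simp [Nat.testBit_xor, t0, pv_tb_odd_zero, pv_tb_even_zero] <;> omega
  | succ j => simp [Nat.testBit_xor, ts, pv_tb_odd_succ, pv_tb_even_succ]

theorem pv_and_pred_lt (m : Nat) (h : 0 < m) : m &&& (m - 1) < m := by
  have := Nat.and_le_right (n := m) (m := m - 1)
  omega

-- m ^ (m & -m) clears m's lowest set bit: it equals m & (m-1)
theorem pv_xor_sub_and (m : Nat) (hm : 0 < m) :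
    m ^^^ (m - (m &&& (m - 1))) = m &&& (m - 1) := by
  induction m using Nat.strong_induction_on with
  | _ m ih =>
    rcases Nat.even_or_odd m with he | ho
    · obtain ⟨k, hk⟩ := he
      have hk2 : m = 2*k := by omega
      have hkpos : 0 < k := by omega
      have h1 : m - 1 = 2*(k-1)+1 := by omega
      have hand : m &&& (m-1) = 2*(k &&& (k-1)) := by
        rw [h1, hk2]; exact pv_and_even_odd k (k-1)
      have hle : k &&& (k-1) ≤ k - 1 := Nat.and_le_right
      have hsub : m - (m &&& (m-1)) = 2*(k - (k &&& (k-1))) := by omega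
      rw [hsub, hand, hk2, pv_xor_even_even k (k - (k &&& (k-1))),
        ih k (by omega) hkpos]
    · obtain ⟨k, hk⟩ := ho
      have h1 : m - 1 = 2*k := by omega
      have hand : m &&& (m-1) = 2*k := by
        rw [h1, hk]; exact pv_odd_and_even k
      have hsub : m - (m &&& (m-1)) = 1 := by omega
      rw [hsub, hand, hk]
      exact pv_odd_xor_one k

-- PySem.Int.band ↑m (-↑m) is m's lowest set bit, in the form m - (m &&& (m-1))
theorem pv_band_neg_self (m : Nat) (h : 0 < m) :
    PySem.Int.band (m : Int) (-(m : Int)) = ((m - (m &&& (m - 1)) : Nat) : Int) := by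
  obtain ⟨n, rfl⟩ : ∃ n, m = n + 1 := ⟨m - 1, by omega⟩
  simp [PySem.Int.band]
  rw [if_pos (show (0:Int) ≤ (n:Int) + 1 by omega), if_neg (show ¬((n:Int) ≤ -1) by omega)]

theorem pv_rest_eq (m : Nat) (h : 0 < m) :
    PySem.Int.bxor (m : Int) (PySem.Int.band (m : Int) (-(m : Int))) =
      ((m &&& (m - 1) : Nat) : Int) := by
  rw [pv_band_neg_self m h, PySem.Int.bxor_natCast]
  exact congrArg _ (pv_xor_sub_and m h)

-- termination of pvScan: clearing the lowest set bit strictly decreases a positive mask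
theorem pvRest_toNat_lt (mask : Int) (h : ¬ mask ≤ 0) :
    (PySem.Int.bxor mask (PySem.Int.band mask (-mask))).toNat < mask.toNat := by
  have h0 : 0 < mask := by omega
  have hm : ((mask.toNat : Nat) : Int) = mask := Int.toNat_of_nonneg (by omega)
  have hmp : 0 < mask.toNat := by omega
  rw [← hm, pv_rest_eq mask.toNat hmp]
  simp only [Int.toNat_natCast]
  exact pv_and_pred_lt mask.toNat hmp

-- B's `_scan`: walk the set bits of `mask` low-to-high
def pvScan (left_size : Int) (conflict_masks : List Int) (mask : Int) : Bool × Int :=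
  if h : mask ≤ 0 then (true, 0)   -- Python: `if mask == 0`; mask < 0 never occurs (totality guard)
  else
    let lsb := PySem.Int.band mask (-mask)
    let v_local : Int := (PySem.Int.bitLength lsb : Int) - 1
    let rest := PySem.Int.bxor mask lsb
    if PySem.Int.band (PySem.List.pyGetD conflict_masks (left_size + v_local) 0)
        (rest <<< left_size.toNat) ≠ 0 then
      (false, 0)
    else
      let r := pvScan left_size conflict_masks rest
      (r.1, r.2 + 1)
termination_by mask.toNat
decreasing_by exact pvRest_toNat_lt mask h

def preprocess_right_half_alt (left_size : Int) (right_size : Int) (conflict_masks : List Int) : List Int × List Int :=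
  if right_size = 0 then ([0], [0])
  else
    let num : Int := 1 <<< right_size.toNat
    let res := (PySem.List.pyRange 0 num 1).map (pvScan left_size conflict_masks)
    (res.map (fun r => if r.1 then r.2 else -10^9),
     (PySem.List.enumerate res).map (fun p => if p.2.1 then p.1 else 0))

-- ===== PRECONDITION & SPEC =====
-- Pre_ excludes exactly the inputs where Python A raises: a negative right_size (ValueError
-- from 1 << right_size), and, when right_size > 0, a negative left_size (ValueError from
-- prev << left_size) or a conflict_masks list shorter than left_size + right_size (IndexError).
def Pre_preprocess_right_half (left_size : Int) (right_size : Int) (conflict_masks : List Int) : Prop :=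
  right_size = 0 ∨ (0 ≤ left_size ∧ 0 < right_size ∧ left_size + right_size ≤ (conflict_masks.length : Int))
instance (left_size : Int) (right_size : Int) (conflict_masks : List Int) : Decidable (Pre_preprocess_right_half left_size right_size conflict_masks) := by unfold Pre_preprocess_right_half; infer_instance

def pvWitness_preprocess_right_half : Int × Int × List Int := (1, 2, [0, 4, 2])

def Spec_preprocess_right_half (left_size : Int) (right_size : Int) (conflict_masks : List Int) (out : List Int × List Int) : Prop := out = preprocess_right_half_alt left_size right_size conflict_masks
instance (left_size : Int) (right_size : Int) (conflict_masks : List Int) (out : List Int × List Int) : Decidable (Spec_preprocess_right_half left_size right_size conflict_masks out) := by unfold Spec_preprocess_right_half; infer_instance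

-- ===== CLAIM (what is proved, stated in full; the proofs are below) =====
def Claim_equal_preprocess_right_half : Prop := ∀ (left_size : Int) (right_size : Int) (conflict_masks : List Int), Dom_preprocess_right_half left_size right_size conflict_masks → Pre_preprocess_right_half left_size right_size conflict_masks → Spec_preprocess_right_half left_size right_size conflict_masks (preprocess_right_half left_size right_size conflict_masks)

-- ===== LEMMAS AND PROOFS =====

theorem pvScan_zero (ls : Int) (cm : List Int) : pvScan ls cm 0 = (true, 0) := by
  rw [pvScan]; norm_num

-- unfolding pvScan at a positive natural mask: the recursive call is at m &&& (m-1)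
theorem pvScan_pos (ls : Int) (cm : List Int) (m : Nat) (h : 0 < m) :
    pvScan ls cm (m : Int) =
      (if PySem.Int.band
            (PySem.List.pyGetD cm
              (ls + ((PySem.Int.bitLength (PySem.Int.band (m : Int) (-(m : Int))) : Int) - 1)) 0)
            (((m &&& (m - 1) : Nat) : Int) <<< ls.toNat) ≠ 0 then
        (false, 0)
      else
        ((pvScan ls cm ((m &&& (m - 1) : Nat) : Int)).1,
         (pvScan ls cm ((m &&& (m - 1) : Nat) : Int)).2 + 1)) := by
  have hpos : (0:Int) < (m:Int) := by exact_mod_cast h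
  have hne : ¬ ((m : Int) ≤ 0) := by omega
  rw [pvScan, dif_neg hne]
  simp only [pv_rest_eq m h]

-- the fold of A's loop over masks 1..n-1, starting from A's initial tables of length N
def pvFoldA (ls : Int) (cm : List Int) (N n : Nat) : List Bool × List Int × List Int :=
  (PySem.List.pyRange 1 (n : Int) 1).foldl (pvStepA ls cm)
    (PySem.List.pySetD (List.replicate N false) 0 true,
     (PySem.List.pySetD (List.replicate N (-10^9 : Int)) 0 0,
      List.replicate N (0 : Int)))

theorem pvFoldA_succ (ls : Int) (cm : List Int) (N n : Nat) (h : 1 ≤ n) :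
    pvFoldA ls cm N (n+1) = pvStepA ls cm (pvFoldA ls cm N n) (n : Int) := by
  unfold pvFoldA
  have hc : ((n+1 : Nat) : Int) = (n : Int) + 1 := by push_cast; ring
  rw [hc, PySem.List.pyRange_one_succ_right (by exact_mod_cast h), List.foldl_append]
  simp

-- the loop invariant for A's DP fold: processed entries agree with B's pvScan,
-- unprocessed entries still hold the initial values
theorem pvLoopA (ls : Int) (cm : List Int) (N : Nat) :
    ∀ n : Nat, 1 ≤ n → n ≤ N →
    (pvFoldA ls cm N n).1.length = N ∧ (pvFoldA ls cm N n).2.1.length = N ∧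
    (pvFoldA ls cm N n).2.2.length = N ∧
    (∀ i : Nat, i < n →
       (pvFoldA ls cm N n).1[i]? = some (pvScan ls cm (i : Int)).1 ∧
       (pvFoldA ls cm N n).2.1[i]? =
         some (if (pvScan ls cm (i : Int)).1 then (pvScan ls cm (i : Int)).2 else -10^9) ∧
       (pvFoldA ls cm N n).2.2[i]? = some (if (pvScan ls cm (i : Int)).1 then (i : Int) else 0)) ∧
    (∀ i : Nat, n ≤ i → i < N →
       (pvFoldA ls cm N n).1[i]? = some false ∧
       (pvFoldA ls cm N n).2.1[i]? = some (-10^9) ∧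
       (pvFoldA ls cm N n).2.2[i]? = some 0) := by
  intro n h1
  induction n, h1 using Nat.le_induction with
  | base =>
    intro hN
    have hN0 : 0 < N := hN
    have e0 : pvFoldA ls cm N 1 =
        ((List.replicate N false).set 0 true,
         ((List.replicate N (-10^9 : Int)).set 0 0, List.replicate N (0 : Int))) := by
      unfold pvFoldA
      rw [PySem.List.pyRange_one_eq_nil (by norm_num)]
      simp [PySem.List.pySetD_of_nonneg]
    refine ⟨by simp [e0], by simp [e0], by simp [e0], ?_, ?_⟩
    · intro i hi
      have : i = 0 := by omega
      subst this
      simp [e0, List.getElem?_set, hN0, pvScan_zero]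
    · intro i hi hiN
      have hne : ¬ (0 = i) := by omega
      simp [e0, List.getElem?_set, hne, List.getElem?_replicate, hiN]
  | succ n hn ih =>
    intro hn1
    obtain ⟨L1, L2, L3, Hp, Hu⟩ := ih (by omega)
    have hn0 : 0 < n := hn
    have hnN : n < N := by omega
    have hplt : (n &&& (n-1)) < n := pv_and_pred_lt n hn0
    have hprev : PySem.Int.bxor (n : Int) (PySem.Int.band (n : Int) (-(n : Int))) =
        ((n &&& (n-1) : Nat) : Int) := pv_rest_eq n hn0
    obtain ⟨hip, hsp, hbp⟩ := Hp (n &&& (n-1)) hplt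
    obtain ⟨hun, hsn, hbn⟩ := Hu n (le_refl n) hnN
    have hfold := pvFoldA_succ ls cm N n hn
    -- the value read from independentR[prev]
    have hlook : PySem.List.pyGetD (pvFoldA ls cm N n).1
        ((n &&& (n-1) : Nat) : Int) false =
        (pvScan ls cm ((n &&& (n-1) : Nat) : Int)).1 := by
      rw [PySem.List.pyGetD_natCast, List.getD_eq_getElem?_getD, hip]
      rfl
    -- the value read from sizeR[prev]
    have hsize : PySem.List.pyGetD (pvFoldA ls cm N n).2.1
        ((n &&& (n-1) : Nat) : Int) 0 =
        (if (pvScan ls cm ((n &&& (n-1) : Nat) : Int)).1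
         then (pvScan ls cm ((n &&& (n-1) : Nat) : Int)).2 else -10^9) := by
      rw [PySem.List.pyGetD_natCast, List.getD_eq_getElem?_getD, hsp]
      rfl
    have hscan := pvScan_pos ls cm n hn0
    by_cases hc : PySem.Int.band
        (PySem.List.pyGetD cm
          (ls + ((PySem.Int.bitLength (PySem.Int.band (n : Int) (-(n : Int))) : Int) - 1)) 0)
        (((n &&& (n - 1) : Nat) : Int) <<< ls.toNat) ≠ 0
    · -- conflict with the lowest bit: mask n is not independent
      have hscann : pvScan ls cm (n : Int) = (false, 0) := by rw [hscan, if_pos hc]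
      have hstep : pvFoldA ls cm N (n+1) =
          ((pvFoldA ls cm N n).1.set n false,
           ((pvFoldA ls cm N n).2.1.set n (-10^9), (pvFoldA ls cm N n).2.2)) := by
        rw [hfold]
        unfold pvStepA
        simp only [hprev, hlook, hsize, PySem.List.pySetD_natCast]
        by_cases hs : (pvScan ls cm ((n &&& (n-1) : Nat) : Int)).1 = true
        · rw [if_neg (fun hcon => hcon hs), if_pos hc]
        · rw [if_pos hs]
      refine ⟨by simp [hstep, L1], by simp [hstep, L2], by simp [hstep, L3], ?_, ?_⟩
      · intro i hi
        rcases Nat.lt_or_ge i n with hi' | hi'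
        · have hne : ¬ (n = i) := by omega
          obtain ⟨a1, a2, a3⟩ := Hp i hi'
          simp [hstep, List.getElem?_set, hne, a1, a2, a3]
        · have : i = n := by omega
          subst this
          simp [hstep, List.getElem?_set, L1, L2, hnN, hscann, hbn]
      · intro i hi hiN
        have hne : ¬ (n = i) := by omega
        obtain ⟨a1, a2, a3⟩ := Hu i (by omega) hiN
        simp [hstep, List.getElem?_set, hne, a1, a2, a3]
    · -- no conflict with the lowest bit
      have hscann : pvScan ls cm (n : Int) =
          ((pvScan ls cm ((n &&& (n-1) : Nat) : Int)).1,
           (pvScan ls cm ((n &&& (n-1) : Nat) : Int)).2 + 1) := by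
        rw [hscan, if_neg hc]
      by_cases hs : (pvScan ls cm ((n &&& (n-1) : Nat) : Int)).1 = true
      · -- prev independent too: mask n is independent
        have hstep : pvFoldA ls cm N (n+1) =
            ((pvFoldA ls cm N n).1.set n true,
             ((pvFoldA ls cm N n).2.1.set n ((pvScan ls cm ((n &&& (n-1) : Nat) : Int)).2 + 1),
              (pvFoldA ls cm N n).2.2.set n (n : Int))) := by
          rw [hfold]
          unfold pvStepA
          simp only [hprev, hlook, hsize, PySem.List.pySetD_natCast]
          rw [if_neg (fun hcon => hcon hs), if_neg hc]
          rw [if_pos hs]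
        refine ⟨by simp [hstep, L1], by simp [hstep, L2], by simp [hstep, L3], ?_, ?_⟩
        · intro i hi
          rcases Nat.lt_or_ge i n with hi' | hi'
          · have hne : ¬ (n = i) := by omega
            obtain ⟨a1, a2, a3⟩ := Hp i hi'
            simp [hstep, List.getElem?_set, hne, a1, a2, a3]
          · have : i = n := by omega
            subst this
            simp [hstep, List.getElem?_set, L1, L2, L3, hnN, hscann, hs]
        · intro i hi hiN
          have hne : ¬ (n = i) := by omega
          obtain ⟨a1, a2, a3⟩ := Hu i (by omega) hiN
          simp [hstep, List.getElem?_set, hne, a1, a2, a3]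
      · -- prev not independent: mask n is not independent
        have hstep : pvFoldA ls cm N (n+1) =
            ((pvFoldA ls cm N n).1.set n false,
             ((pvFoldA ls cm N n).2.1.set n (-10^9), (pvFoldA ls cm N n).2.2)) := by
          rw [hfold]
          unfold pvStepA
          simp only [hprev, hlook, hsize, PySem.List.pySetD_natCast]
          rw [if_pos hs]
        refine ⟨by simp [hstep, L1], by simp [hstep, L2], by simp [hstep, L3], ?_, ?_⟩
        · intro i hi
          rcases Nat.lt_or_ge i n with hi' | hi'
          · have hne : ¬ (n = i) := by omega
            obtain ⟨a1, a2, a3⟩ := Hp i hi'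
            simp [hstep, List.getElem?_set, hne, a1, a2, a3]
          · have : i = n := by omega
            subst this
            simp [hstep, List.getElem?_set, L1, L2, hnN, hscann, hs, hbn]
        · intro i hi hiN
          have hne : ¬ (n = i) := by omega
          obtain ⟨a1, a2, a3⟩ := Hu i (by omega) hiN
          simp [hstep, List.getElem?_set, hne, a1, a2, a3]

-- ===== VERDICT (by name: the statement is the Claim_ definition above) =====
theorem preprocess_right_half_spec : Claim_equal_preprocess_right_half := by
  intro ls rs cm _ _
  unfold Spec_preprocess_right_half
  by_cases hrs : rs = 0
  · simp [preprocess_right_half, preprocess_right_half_alt, hrs]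
  · have hA : preprocess_right_half ls rs cm =
        ((pvFoldA ls cm (2 ^ rs.toNat) (2 ^ rs.toNat)).2.1,
         (pvFoldA ls cm (2 ^ rs.toNat) (2 ^ rs.toNat)).2.2) := by
      simp only [preprocess_right_half, if_neg hrs, pvFoldA, Nat.shiftLeft_eq, one_mul,
        Int.toNat_natCast]
    have hB : preprocess_right_half_alt ls rs cm =
        (((PySem.List.pyRange 0 ((2 ^ rs.toNat : Nat) : Int) 1).map (pvScan ls cm)).map
           (fun r => if r.1 then r.2 else -10^9),
         (PySem.List.enumerate
            ((PySem.List.pyRange 0 ((2 ^ rs.toNat : Nat) : Int) 1).map (pvScan ls cm))).map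
           (fun p => if p.2.1 then p.1 else 0)) := by
      simp only [preprocess_right_half_alt, if_neg hrs, Nat.shiftLeft_eq, one_mul]
    obtain ⟨L1, L2, L3, Hp, _⟩ :=
      pvLoopA ls cm (2 ^ rs.toNat) (2 ^ rs.toNat) Nat.one_le_two_pow (le_refl _)
    rw [hA, hB]
    refine Prod.ext_iff.mpr ⟨?_, ?_⟩
    · apply List.ext_getElem?
      intro i
      by_cases hi : i < 2 ^ rs.toNat
      · obtain ⟨_, a2, _⟩ := Hp i hi
        rw [a2, List.getElem?_map, List.getElem?_map, PySem.List.getElem?_pyRange_one,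
          Int.sub_zero, Int.toNat_natCast, if_pos hi]
        simp
      · rw [List.getElem?_eq_none (by omega : (pvFoldA ls cm (2 ^ rs.toNat) (2 ^ rs.toNat)).2.1.length ≤ i)]
        symm
        apply List.getElem?_eq_none
        rw [List.length_map, List.length_map, PySem.List.length_pyRange_one,
          Int.sub_zero, Int.toNat_natCast]
        omega
    · apply List.ext_getElem?
      intro i
      by_cases hi : i < 2 ^ rs.toNat
      · obtain ⟨_, _, a3⟩ := Hp i hi
        rw [a3, List.getElem?_map, PySem.List.getElem?_enumerate, List.getElem?_map,
          PySem.List.getElem?_pyRange_one, Int.sub_zero, Int.toNat_natCast, if_pos hi]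
        simp
      · rw [List.getElem?_eq_none (by omega : (pvFoldA ls cm (2 ^ rs.toNat) (2 ^ rs.toNat)).2.2.length ≤ i)]
        symm
        apply List.getElem?_eq_none
        rw [List.length_map, PySem.List.length_enumerate, List.length_map,
          PySem.List.length_pyRange_one, Int.sub_zero, Int.toNat_natCast]
        omega
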